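-- pv_equiv track=rewrite | github.com/Lostl1ght/bmstu_python | lab_04/mth.py | find_if_0
-- ===== SOURCE A (Python) =====
-- def find_if_0(x, tris):
--     count = 0
--     for i in range(len(tris)):
--         if tris[i]['dot0']['x'] == x:
--             count += 1
--             continue
--         if tris[i]['dot1']['x'] == x:
--             count += 1
--             continue
--         if tris[i]['dot2']['x'] == x:
--             count += 1
--             continue
--
--         if (right_left(tris[i], x)):
--             count += 1
--
--     return count
--
-- def right_left(tri, x):
--     right = 0
--     left = 0
--
--     if tri['dot0']['x'] > x:
--         right += 1
--     if tri['dot1']['x'] > x: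
--         right += 1
--     if tri['dot2']['x'] > x:
--         right += 1
--
--     if tri['dot0']['x'] < x:
--         left += 1
--     if tri['dot1']['x'] < x:
--         left += 1
--     if tri['dot2']['x'] < x:
--         left += 1
--
--     return right == 2 and left == 1 or right == 1 and left == 2
-- ===== SOURCE B (Python) =====
-- def find_if_0(x, tris):
--     # Complement counting: a triangle misses the vertical line x exactly when
--     # all three vertices lie strictly on one side of it.  Count those misses
--     # in two staged passes over precomputed vertex x-lists and subtract.
--     vxs = [[t['dot0']['x'], t['dot1']['x'], t['dot2']['x']] for t in tris]
--     strictly_left = sum(1 for vs in vxs if all(v < x for v in vs))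
--     strictly_right = sum(1 for vs in vxs if all(v > x for v in vs))
--     return len(tris) - strictly_left - strictly_right
-- ===== Notes on version B (the rewrite author's own statement) =====
-- stated objective: alternative
-- what changed: Counts the complement instead: precomputes each triangle's three vertex x-coordinates, counts in two staged passes the triangles lying strictly left and strictly right of the line, and returns len(tris) minus those, replacing A's per-triangle equality guards plus side-counting helper.
import Mathlib
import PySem

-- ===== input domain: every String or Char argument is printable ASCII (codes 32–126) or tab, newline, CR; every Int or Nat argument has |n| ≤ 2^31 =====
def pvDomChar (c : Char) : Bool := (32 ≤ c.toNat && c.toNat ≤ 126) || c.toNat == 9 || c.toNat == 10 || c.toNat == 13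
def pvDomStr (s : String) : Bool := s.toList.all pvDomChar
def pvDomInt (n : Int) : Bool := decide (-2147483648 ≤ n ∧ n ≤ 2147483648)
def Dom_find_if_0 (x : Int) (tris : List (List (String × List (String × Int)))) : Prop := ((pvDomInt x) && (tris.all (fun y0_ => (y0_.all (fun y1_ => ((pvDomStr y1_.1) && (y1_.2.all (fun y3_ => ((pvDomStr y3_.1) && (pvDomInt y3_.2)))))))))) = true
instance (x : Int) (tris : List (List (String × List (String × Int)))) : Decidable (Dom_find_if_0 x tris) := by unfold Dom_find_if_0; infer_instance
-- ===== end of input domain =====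

-- B counts the complement (triangles strictly left / strictly right of the line, in staged passes over precomputed vertex lists) and subtracts from len(tris); alternative decomposition, same O(n).


-- first-match association-list lookup (Python dict lookup)
def plook {α : Type} (d : List (String × α)) (k : String) : Option α :=
  (d.find? (fun p => p.1 == k)).map (·.2)

-- tri[k]['x'] ; total with default 0 (Pre_ guarantees the lookups succeed, so the default is never used inside Pre_)
def getx (tri : List (String × List (String × Int))) (k : String) : Int :=
  ((plook tri k).getD []) |> (fun d => (plook d "x").getD 0)

-- ===== PORT A =====
def right_left (tri : List (String × List (String × Int))) (x : Int) : Bool :=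
  let right : Int :=
    (if getx tri "dot0" > x then 1 else 0) +
    (if getx tri "dot1" > x then 1 else 0) +
    (if getx tri "dot2" > x then 1 else 0)
  let left : Int :=
    (if getx tri "dot0" < x then 1 else 0) +
    (if getx tri "dot1" < x then 1 else 0) +
    (if getx tri "dot2" < x then 1 else 0)
  (right == 2 && left == 1) || (right == 1 && left == 2)

def find_if_0 (x : Int) (tris : List (List (String × List (String × Int)))) : Int :=
  tris.foldl
    (fun count tri =>
      if getx tri "dot0" = x then count + 1
      else if getx tri "dot1" = x then count + 1
      else if getx tri "dot2" = x then count + 1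
      else if right_left tri x then count + 1
      else count)
    0

-- ===== PORT B =====
def find_if_0_alt (x : Int) (tris : List (List (String × List (String × Int)))) : Int :=
  let vxs := tris.map (fun t => [getx t "dot0", getx t "dot1", getx t "dot2"])
  let strictly_left := vxs.foldl (fun s vs => s + (if vs.all (fun v => v < x) then (1 : Int) else 0)) 0
  let strictly_right := vxs.foldl (fun s vs => s + (if vs.all (fun v => v > x) then (1 : Int) else 0)) 0
  (tris.length : Int) - strictly_left - strictly_right

-- ===== PRECONDITION & SPEC =====
-- Pre_ excludes exactly the inputs where Python A raises KeyError: a triangle missing key 'dot0'/'dot1'/'dot2', or a vertex missing key 'x'.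
def Pre_find_if_0 (x : Int) (tris : List (List (String × List (String × Int)))) : Prop :=
  ∀ t ∈ tris, ∀ k ∈ ["dot0", "dot1", "dot2"],
    ∃ d, plook t k = some d ∧ (plook d "x").isSome = true
instance (x : Int) (tris : List (List (String × List (String × Int)))) : Decidable (Pre_find_if_0 x tris) := by unfold Pre_find_if_0; infer_instance

def pvWitness_find_if_0 : Int × (List (List (String × List (String × Int)))) :=
  (1, [[("dot0", [("x", 0)]), ("dot1", [("x", 2)]), ("dot2", [("x", 5)])]])

def Spec_find_if_0 (x : Int) (tris : List (List (String × List (String × Int)))) (out : Int) : Prop := out = find_if_0_alt x tris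
instance (x : Int) (tris : List (List (String × List (String × Int)))) (out : Int) : Decidable (Spec_find_if_0 x tris out) := by unfold Spec_find_if_0; infer_instance

-- ===== CLAIM (what is proved, stated in full; the proofs are below) =====
def Claim_equal_find_if_0 : Prop := ∀ (x : Int) (tris : List (List (String × List (String × Int)))), Dom_find_if_0 x tris → Pre_find_if_0 x tris → Spec_find_if_0 x tris (find_if_0 x tris)

-- ===== LEMMAS AND PROOFS =====
-- shift an additive foldl's accumulator out
theorem foldl_add_shift {α : Type} (f : α → Int) (ts : List α) :
    ∀ a : Int, ts.foldl (fun s v => s + f v) a = a + ts.foldl (fun s v => s + f v) 0 := by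
  induction ts with
  | nil => intro a; simp
  | cons t ts ih =>
      intro a
      simp only [List.foldl_cons]
      rw [ih (a + f t), ih (0 + f t)]
      ring

-- A's per-triangle contribution equals 1 - [all three < x] - [all three > x]
theorem step_eq (x : Int) (count : Int) (tri : List (String × List (String × Int))) :
    (if getx tri "dot0" = x then count + 1
     else if getx tri "dot1" = x then count + 1
     else if getx tri "dot2" = x then count + 1
     else if right_left tri x then count + 1
     else count)
    = count + (1
        - (if [getx tri "dot0", getx tri "dot1", getx tri "dot2"].all (fun v => v < x) then (1 : Int) else 0)
        - (if [getx tri "dot0", getx tri "dot1", getx tri "dot2"].all (fun v => v > x) then (1 : Int) else 0)) := by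
  simp only [right_left, List.all_cons, List.all_nil, Bool.and_true,
    Bool.or_eq_true, Bool.and_eq_true, beq_iff_eq, decide_eq_true_eq]
  split_ifs <;> omega

theorem fold_eq (x : Int) (ts : List (List (String × List (String × Int)))) :
    ∀ a : Int,
    ts.foldl (fun count tri =>
        if getx tri "dot0" = x then count + 1
        else if getx tri "dot1" = x then count + 1
        else if getx tri "dot2" = x then count + 1
        else if right_left tri x then count + 1
        else count) a
    = a + (ts.length : Int)
      - (ts.map (fun t => [getx t "dot0", getx t "dot1", getx t "dot2"])).foldl
          (fun s vs => s + (if vs.all (fun v => v < x) then (1 : Int) else 0)) 0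
      - (ts.map (fun t => [getx t "dot0", getx t "dot1", getx t "dot2"])).foldl
          (fun s vs => s + (if vs.all (fun v => v > x) then (1 : Int) else 0)) 0 := by
  induction ts with
  | nil => intro a; simp
  | cons t ts ih =>
      intro a
      simp only [List.foldl_cons, List.map_cons, List.length_cons, zero_add]
      rw [ih, step_eq x a t,
        foldl_add_shift (fun vs => if vs.all (fun v => v < x) then (1 : Int) else 0)
          (ts.map (fun t => [getx t "dot0", getx t "dot1", getx t "dot2"]))
          (if [getx t "dot0", getx t "dot1", getx t "dot2"].all (fun v => v < x) then (1 : Int) else 0),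
        foldl_add_shift (fun vs => if vs.all (fun v => v > x) then (1 : Int) else 0)
          (ts.map (fun t => [getx t "dot0", getx t "dot1", getx t "dot2"]))
          (if [getx t "dot0", getx t "dot1", getx t "dot2"].all (fun v => v > x) then (1 : Int) else 0)]
      push_cast
      ring

theorem find_if_0_spec : Claim_equal_find_if_0 := by
  intro x tris _ _
  show find_if_0 x tris = find_if_0_alt x tris
  unfold find_if_0 find_if_0_alt
  simpa using fold_eq x tris 0
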